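-- pv_equiv track=rewrite | github.com/rom1mouret/assortment | gating_models.py | complexity_feature_indexing
-- ===== SOURCE A (Python) =====
-- def agreement_feature_indexing(dim):
--     index = {}
--     for i in range(dim):
--         for j in range(i+1, dim):
--             index[(i, j)] = len(index)
--     return index
--
-- def complexity_feature_indexing(dim, total_features):
--     first_index = max(agreement_feature_indexing(dim).values())
--     feat_per_detector = (total_features - first_index)//dim
--     index = []
--     for i in range(dim):
--         start = first_index + i*feat_per_detector
--         index.append(list(range(start, start+feat_per_detector)))
--
--     return index
-- ===== SOURCE B (Python) =====
-- def complexity_feature_indexing(dim, total_features):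
--     # max value of the agreement index is the number of pairs minus one: dim*(dim-1)//2 - 1
--     first_index = dim * (dim - 1) // 2 - 1
--     step = (total_features - first_index) // dim
--     return [list(range(first_index + i * step, first_index + (i + 1) * step))
--             for i in range(dim)]
-- ===== Notes on version B (the rewrite author's own statement) =====
-- stated objective: faster
-- what changed: Replaces building the O(dim^2) pairs dictionary and taking the max of its values with the closed form dim*(dim-1)//2 - 1, then emits the ranges directly.
import Mathlib
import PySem

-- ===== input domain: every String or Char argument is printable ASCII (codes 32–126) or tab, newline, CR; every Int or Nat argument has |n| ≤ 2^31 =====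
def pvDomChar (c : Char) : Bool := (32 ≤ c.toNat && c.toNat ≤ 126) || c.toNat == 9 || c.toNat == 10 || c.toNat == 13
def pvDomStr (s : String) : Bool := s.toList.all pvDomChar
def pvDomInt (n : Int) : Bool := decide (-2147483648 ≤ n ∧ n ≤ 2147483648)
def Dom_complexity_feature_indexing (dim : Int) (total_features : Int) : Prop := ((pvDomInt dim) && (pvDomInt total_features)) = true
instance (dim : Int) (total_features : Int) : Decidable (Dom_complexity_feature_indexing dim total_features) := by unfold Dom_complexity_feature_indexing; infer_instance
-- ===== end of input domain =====

-- B replaces A's O(dim^2) pairs dictionary and max() scan with the closed form dim*(dim-1)//2 - 1 (faster).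

-- ===== PORT A =====
-- helper: the pairs dictionary built by the nested 'for i / for j' loops, value = len(index)
def agreement_feature_indexing (dim : Int) : PySem.Dict (Int × Int) Int :=
  (PySem.List.pyRange 0 dim 1).foldl (fun index i =>
    (PySem.List.pyRange (i + 1) dim 1).foldl (fun index j =>
      index.insert (i, j) ((index.size : Nat) : Int)) index) PySem.Dict.empty

def complexity_feature_indexing (dim : Int) (total_features : Int) : List (List Int) :=
  match PySem.List.max? (agreement_feature_indexing dim).values (fun x => x) with
  | none => []  -- Python raises ValueError here (dim < 2): max() of an empty dict's values; excluded by Pre_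
  | some first_index =>
    let feat_per_detector := PySem.Int.floordiv (total_features - first_index) dim
    (PySem.List.pyRange 0 dim 1).foldl (fun index i =>
      let start := first_index + i * feat_per_detector
      index ++ [PySem.List.pyRange start (start + feat_per_detector) 1]) []

-- ===== PORT B =====
def complexity_feature_indexing_alt (dim : Int) (total_features : Int) : List (List Int) :=
  let first_index := PySem.Int.floordiv (dim * (dim - 1)) 2 - 1
  let step := PySem.Int.floordiv (total_features - first_index) dim
  (PySem.List.pyRange 0 dim 1).map (fun i =>
    PySem.List.pyRange (first_index + i * step) (first_index + (i + 1) * step) 1)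

-- ===== PRECONDITION & SPEC =====
-- Pre_ excludes exactly dim < 2, where A's pairs dictionary is empty and max() raises ValueError.
def Pre_complexity_feature_indexing (dim : Int) (total_features : Int) : Prop := 2 ≤ dim
instance (dim : Int) (total_features : Int) : Decidable (Pre_complexity_feature_indexing dim total_features) := by unfold Pre_complexity_feature_indexing; infer_instance
def pvWitness_complexity_feature_indexing : Int × Int := (3, 10)

def Spec_complexity_feature_indexing (dim : Int) (total_features : Int) (out : List (List Int)) : Prop := out = complexity_feature_indexing_alt dim total_features
instance (dim : Int) (total_features : Int) (out : List (List Int)) : Decidable (Spec_complexity_feature_indexing dim total_features out) := by unfold Spec_complexity_feature_indexing; infer_instance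

-- ===== CLAIM (what is proved, stated in full; the proofs are below) =====
def Claim_equal_complexity_feature_indexing : Prop := ∀ (dim : Int) (total_features : Int), Dom_complexity_feature_indexing dim total_features → Pre_complexity_feature_indexing dim total_features → Spec_complexity_feature_indexing dim total_features (complexity_feature_indexing dim total_features)

-- ===== LEMMAS AND PROOFS =====

-- foldl max over a nonempty integer range is max of the seed and the last element
lemma foldl_max_pyRange : ∀ (n : Nat) (a b x : Int), (b - a).toNat = n → a < b →
    (PySem.List.pyRange a b 1).foldl max x = max x (b - 1) := by
  intro n
  induction n with
  | zero => intro a b x hn h; omega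
  | succ m ih =>
    intro a b x hn h
    rw [PySem.List.pyRange_one_cons h, List.foldl_cons]
    by_cases h2 : a + 1 < b
    · rw [ih (a+1) b (max x a) (by omega) h2]
      omega
    · have hb : b = a + 1 := by omega
      subst hb
      rw [PySem.List.pyRange_one_eq_nil (by omega)]
      simp

-- max(range(a, b)) = b - 1
lemma max?_pyRange (a b : Int) (h : a < b) :
    PySem.List.max? (PySem.List.pyRange a b 1) (fun y => y) = some (b - 1) := by
  rw [PySem.List.pyRange_one_cons h, PySem.List.max?_id_cons]
  by_cases h2 : a + 1 < b
  · rw [foldl_max_pyRange (b - (a+1)).toNat (a+1) b a rfl h2]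
    congr 1; omega
  · rw [PySem.List.pyRange_one_eq_nil (by omega)]
    simp; omega

-- the inner 'for j in range(i+1, dim)' loop: keys stay ≤ i in the first component,
-- the values list stays range(0, size), and the size grows by the range length
lemma innerLoop (dim i : Int) : ∀ (n : Nat) (j : Int) (d : PySem.Dict (Int × Int) Int),
    (dim - j).toNat = n →
    (∀ p ∈ d.keys, p.1 < i ∨ (p.1 = i ∧ p.2 < j)) →
    d.values = PySem.List.pyRange 0 (d.size : Int) 1 →
    (∀ p ∈ ((PySem.List.pyRange j dim 1).foldl (fun d j' => d.insert (i, j') ((d.size : Nat) : Int)) d).keys, p.1 ≤ i) ∧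
    ((PySem.List.pyRange j dim 1).foldl (fun d j' => d.insert (i, j') ((d.size : Nat) : Int)) d).values
      = PySem.List.pyRange 0 ((((PySem.List.pyRange j dim 1).foldl (fun d j' => d.insert (i, j') ((d.size : Nat) : Int)) d).size : Int)) 1 ∧
    ((((PySem.List.pyRange j dim 1).foldl (fun d j' => d.insert (i, j') ((d.size : Nat) : Int)) d).size : Int)) = (d.size : Int) + n := by
  intro n
  induction n with
  | zero =>
    intro j d hn hk hv
    rw [PySem.List.pyRange_one_eq_nil (by omega), List.foldl_nil]
    refine ⟨fun p hp => ?_, hv, by omega⟩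
    rcases hk p hp with h | ⟨h, _⟩ <;> omega
  | succ m ih =>
    intro j d hn hk hv
    have hj : j < dim := by omega
    rw [PySem.List.pyRange_one_cons hj, List.foldl_cons]
    -- the key (i, j) is fresh
    have hfresh : d.contains (i, j) = false := by
      by_contra hc
      have : (i, j) ∈ d.keys := (PySem.Dict.contains_iff_mem_keys d (i, j)).mp
        (by revert hc; cases d.contains (i, j) <;> simp)
      rcases hk _ this with h | ⟨_, h⟩ <;> omega
    have hkeys := PySem.Dict.keys_insert_of_not_contains d (k := (i, j)) ((d.size : Nat) : Int) hfresh
    have hitems := PySem.Dict.items_insert_of_not_contains d (k := (i, j)) ((d.size : Nat) : Int) hfresh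
    have hsz : ((d.insert (i, j) ((d.size : Nat) : Int)).size : Int) = (d.size : Int) + 1 := by
      have h1 : (d.insert (i, j) ((d.size : Nat) : Int)).size = d.size + 1 := by
        show (d.insert (i, j) ((d.size : Nat) : Int)).items.length = d.items.length + 1
        rw [hitems]; simp
      rw [h1]; push_cast; ring
    have hvals : (d.insert (i, j) ((d.size : Nat) : Int)).values
        = PySem.List.pyRange 0 ((d.size : Int) + 1) 1 := by
      simp only [PySem.Dict.values, hitems, List.map_append, List.map_cons, List.map_nil]
      rw [PySem.List.pyRange_one_succ_right (by positivity)]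
      rw [← hv]; simp [PySem.Dict.values]
    have := ih (j + 1) (d.insert (i, j) ((d.size : Nat) : Int)) (by omega)
      (by
        intro p hp
        rw [hkeys] at hp
        rcases List.mem_append.mp hp with hp | hp
        · rcases hk p hp with h | ⟨h1, h2⟩
          · exact Or.inl h
          · exact Or.inr ⟨h1, by omega⟩
        · simp at hp; subst hp; exact Or.inr ⟨rfl, by omega⟩)
      (by rw [hvals, hsz])
    refine ⟨this.1, this.2.1, by rw [this.2.2, hsz]; push_cast; ring⟩

-- the outer 'for i in range(dim)' loop: finally values = range(0, size) and 2*size = dim*(dim-1)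
lemma outerLoop (dim : Int) : ∀ (n : Nat) (i : Int) (d : PySem.Dict (Int × Int) Int),
    (dim - i).toNat = n → i ≤ dim →
    (∀ p ∈ d.keys, p.1 < i) →
    d.values = PySem.List.pyRange 0 (d.size : Int) 1 →
    2 * (d.size : Int) = i * (2 * dim - i - 1) →
    ((PySem.List.pyRange i dim 1).foldl (fun index i' =>
        (PySem.List.pyRange (i' + 1) dim 1).foldl (fun index j =>
          index.insert (i', j) ((index.size : Nat) : Int)) index) d).values
      = PySem.List.pyRange 0 (((PySem.List.pyRange i dim 1).foldl (fun index i' =>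
          (PySem.List.pyRange (i' + 1) dim 1).foldl (fun index j =>
            index.insert (i', j) ((index.size : Nat) : Int)) index) d).size : Int) 1 ∧
    2 * (((PySem.List.pyRange i dim 1).foldl (fun index i' =>
        (PySem.List.pyRange (i' + 1) dim 1).foldl (fun index j =>
          index.insert (i', j) ((index.size : Nat) : Int)) index) d).size : Int) = dim * (dim - 1) := by
  intro n
  induction n with
  | zero =>
    intro i d hn hle hk hv hs
    have : i = dim := by omega
    subst this
    rw [PySem.List.pyRange_one_eq_nil (by omega), List.foldl_nil]
    exact ⟨hv, by linear_combination hs⟩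
  | succ m ih =>
    intro i d hn hle hk hv hs
    have hi : i < dim := by omega
    rw [PySem.List.pyRange_one_cons hi, List.foldl_cons]
    obtain ⟨hk1, hv1, hs1⟩ := innerLoop dim i (dim - (i+1)).toNat (i + 1) d rfl
      (fun p hp => Or.inl (hk p hp)) hv
    have hcast : (((dim - (i+1)).toNat : Int)) = dim - i - 1 := by omega
    exact ih (i + 1) _ (by omega) (by omega)
      (fun p hp => by have := hk1 p hp; omega) hv1
      (by rw [hs1, hcast]; linear_combination hs)

lemma agreement_spec (dim : Int) (h : 0 ≤ dim) :
    (agreement_feature_indexing dim).values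
      = PySem.List.pyRange 0 ((agreement_feature_indexing dim).size : Int) 1 ∧
    2 * ((agreement_feature_indexing dim).size : Int) = dim * (dim - 1) := by
  unfold agreement_feature_indexing
  exact outerLoop dim (dim - 0).toNat 0 PySem.Dict.empty rfl h (by simp) (by decide)
    (by norm_num [show (PySem.Dict.empty : PySem.Dict (Int × Int) Int).size = 0 from rfl])

lemma main_eq (dim tf : Int) (hpre : 2 ≤ dim) :
    complexity_feature_indexing dim tf = complexity_feature_indexing_alt dim tf := by
  obtain ⟨hv, hs⟩ := agreement_spec dim (by omega)
  have hS1 : 1 ≤ ((agreement_feature_indexing dim).size : Int) := by nlinarith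
  have hfi : PySem.Int.floordiv (dim * (dim - 1)) 2 - 1 = ((agreement_feature_indexing dim).size : Int) - 1 := by
    rw [← hs]
    have : PySem.Int.floordiv (2 * ((agreement_feature_indexing dim).size : Int)) 2
        = ((agreement_feature_indexing dim).size : Int) :=
      (PySem.Int.floordiv_eq_iff_of_pos (by norm_num)).mpr ⟨by omega, by omega⟩
    omega
  unfold complexity_feature_indexing complexity_feature_indexing_alt
  rw [hv, max?_pyRange 0 _ (by omega), hfi]
  simp only [PySem.List.foldl_append_singleton_eq_map, List.nil_append]
  apply List.map_congr_left
  intro i _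
  congr 1
  ring

-- ===== VERDICT (by name: the statement is the Claim_ definition above) =====
theorem complexity_feature_indexing_spec : Claim_equal_complexity_feature_indexing := by
  intro dim tf _ hpre
  exact main_eq dim tf hpre
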